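-- pv_equiv track=rewrite | github.com/cgonzalezp91/AMD | Python/stringYield.py | stringYield
-- ===== SOURCE A (Python) =====
-- def stringYield(str):
--     returnArray = []
--     i = 0
--     j = len(str) - 1
--     while(i <= j):
--         if(i == j):
--             returnArray.append(f"({str[i]},)")
--         else:
--             returnArray.append(f"({str[i]},{str[j]})")
--         i += 1
--         j -= 1
--     return returnArray
-- ===== SOURCE B (Python) =====
-- def stringYield(str):
--     n = len(str)
--     h = n // 2
--     out = [f"({a},{b})" for a, b in zip(str[:h], str[::-1][:h])]
--     if n % 2:
--         out.append(f"({str[h]},)")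
--     return out
-- ===== Notes on version B (the rewrite author's own statement) =====
-- stated objective: idiomatic
-- what changed: Replaced the two-pointer while loop with its in-loop i==j check by a zip of the front half with the reversed back half, formatting each aligned pair in a comprehension and appending the odd middle character after a single parity check.
import Mathlib
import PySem

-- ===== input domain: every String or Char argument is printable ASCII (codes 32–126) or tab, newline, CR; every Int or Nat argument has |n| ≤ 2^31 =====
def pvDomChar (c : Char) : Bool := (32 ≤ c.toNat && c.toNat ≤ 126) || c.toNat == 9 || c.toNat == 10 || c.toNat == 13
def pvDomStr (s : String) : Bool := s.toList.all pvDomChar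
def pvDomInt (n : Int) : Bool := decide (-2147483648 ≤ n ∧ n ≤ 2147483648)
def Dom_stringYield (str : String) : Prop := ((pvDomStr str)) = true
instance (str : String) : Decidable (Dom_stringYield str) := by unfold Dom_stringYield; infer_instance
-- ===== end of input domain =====

-- B pairs the front half with the reversed back half by zip, with one parity check for
-- the middle character, instead of A's two-pointer while loop (objective: idiomatic).

-- ===== PORT A =====
-- the while loop of A: indices i and j move toward each other
def stringYieldLoop (cs : List Char) (i j : Int) : List String :=
  if _h : i ≤ j then
    (if i == j then
       "(" ++ String.ofList [(PySem.List.pyGet? cs i).getD ' '] ++ ",)"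
     else
       "(" ++ String.ofList [(PySem.List.pyGet? cs i).getD ' '] ++ "," ++
         String.ofList [(PySem.List.pyGet? cs j).getD ' '] ++ ")")
    :: stringYieldLoop cs (i + 1) (j - 1)
  else []
termination_by (j + 1 - i).toNat
decreasing_by omega

def stringYield (str : String) : List String :=
  stringYieldLoop str.toList 0 ((str.toList.length : Int) - 1)

-- ===== PORT B =====
def stringYield_alt (str : String) : List String :=
  let cs := str.toList
  let n := cs.length
  let h := n / 2
  let out := ((cs.take h).zip (cs.reverse.take h)).map
    (fun p => "(" ++ String.ofList [p.1] ++ "," ++ String.ofList [p.2] ++ ")")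
  if n % 2 = 1 then out ++ ["(" ++ String.ofList [cs.getD h ' '] ++ ",)"] else out

-- ===== PRECONDITION & SPEC =====
def Spec_stringYield (str : String) (out : List String) : Prop := out = stringYield_alt str
instance (str : String) (out : List String) : Decidable (Spec_stringYield str out) := by unfold Spec_stringYield; infer_instance

-- ===== CLAIM (what is proved, stated in full; the proofs are below) =====
def Claim_equal_stringYield : Prop := ∀ (str : String), Dom_stringYield str → Spec_stringYield str (stringYield str)

-- ===== LEMMAS AND PROOFS =====

-- list-level form of B's body (the let-bindings of stringYield_alt zeta-reduced)
def altL (cs : List Char) : List String :=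
  if cs.length % 2 = 1 then
    ((cs.take (cs.length / 2)).zip (cs.reverse.take (cs.length / 2))).map
      (fun p => "(" ++ String.ofList [p.1] ++ "," ++ String.ofList [p.2] ++ ")")
    ++ ["(" ++ String.ofList [cs.getD (cs.length / 2) ' '] ++ ",)"]
  else
    ((cs.take (cs.length / 2)).zip (cs.reverse.take (cs.length / 2))).map
      (fun p => "(" ++ String.ofList [p.1] ++ "," ++ String.ofList [p.2] ++ ")")

theorem alt_eq_altL (str : String) : stringYield_alt str = altL str.toList := rfl

theorem pyGet?_shift (x : Char) (cs : List Char) (i : Int) (hi : 0 ≤ i) :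
    PySem.List.pyGet? (x :: cs) (i + 1) = PySem.List.pyGet? cs i := by
  rw [PySem.List.pyGet?_of_nonneg _ (by omega), PySem.List.pyGet?_of_nonneg _ hi]
  have h1 : (i + 1).toNat = i.toNat + 1 := by omega
  rw [h1]
  simp

theorem pyGet?_left (cs ds : List Char) (i : Int) (hi : 0 ≤ i) (hl : i < (cs.length : Int)) :
    PySem.List.pyGet? (cs ++ ds) i = PySem.List.pyGet? cs i := by
  rw [PySem.List.pyGet?_of_nonneg _ hi, PySem.List.pyGet?_of_nonneg _ hi]
  rw [List.getElem?_append_left (by omega)]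

-- moving the loop one position to the left across a leading element
theorem loop_shift (x : Char) (cs : List Char) (i j : Int) (hi : 0 ≤ i) :
    stringYieldLoop (x :: cs) (i + 1) (j + 1) = stringYieldLoop cs i j := by
  by_cases h : i ≤ j
  · conv_lhs => rw [stringYieldLoop]
    conv_rhs => rw [stringYieldLoop]
    rw [dif_pos (show i + 1 ≤ j + 1 by omega), dif_pos h]
    have ebeq : ((i + 1 : Int) == j + 1) = (i == j) := by
      by_cases hij : i = j <;> simp [hij]
    rw [pyGet?_shift x cs i hi, pyGet?_shift x cs j (by omega), ebeq]
    have hrec := loop_shift x cs (i + 1) (j - 1) (by omega)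
    have e : (j - 1 : Int) + 1 = j + 1 - 1 := by ring
    rw [e] at hrec
    rw [hrec]
  · conv_lhs => rw [stringYieldLoop]
    conv_rhs => rw [stringYieldLoop]
    rw [dif_neg (show ¬ (i + 1 ≤ j + 1) by omega), dif_neg h]
termination_by (j + 1 - i).toNat
decreasing_by omega

-- elements appended past j never influence the loop
theorem loop_append (cs ds : List Char) (i j : Int) (hi : 0 ≤ i) (hj : j < (cs.length : Int)) :
    stringYieldLoop (cs ++ ds) i j = stringYieldLoop cs i j := by
  by_cases h : i ≤ j
  · conv_lhs => rw [stringYieldLoop]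
    conv_rhs => rw [stringYieldLoop]
    rw [dif_pos h, dif_pos h]
    rw [pyGet?_left cs ds i hi (by omega), pyGet?_left cs ds j (by omega) hj,
        loop_append cs ds (i + 1) (j - 1) (by omega) (by omega)]
  · conv_lhs => rw [stringYieldLoop]
    conv_rhs => rw [stringYieldLoop]
    rw [dif_neg h, dif_neg h]
termination_by (j + 1 - i).toNat
decreasing_by omega

theorem main_lemma : ∀ (n : Nat) (cs : List Char), cs.length = n →
    stringYieldLoop cs 0 ((cs.length : Int) - 1) = altL cs := by
  intro n
  induction n using Nat.strong_induction_on with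
  | _ n ih =>
    intro cs hlen
    match cs with
    | [] =>
      conv_lhs => rw [stringYieldLoop]
      simp [altL]
    | [a] =>
      have e : ((([a] : List Char).length : Int) - 1) = 0 := by simp
      rw [e]
      conv_lhs => rw [stringYieldLoop]
      rw [dif_pos (le_refl (0 : Int)), if_pos (by simp)]
      conv_lhs => rw [stringYieldLoop]
      rw [dif_neg (by omega)]
      unfold altL
      simp
    | a :: c2 :: rest =>
      rcases List.eq_nil_or_concat (c2 :: rest) with hnil | ⟨ms, b, hms⟩
      · simp at hnil
      · rw [List.concat_eq_append] at hms
        have hcs : a :: c2 :: rest = a :: (ms ++ [b]) := by rw [hms]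
        rw [hcs]
        have hlenL : (a :: (ms ++ [b])).length = ms.length + 2 := by simp
        have hn : n = ms.length + 2 := by rw [← hlen, hcs, hlenL]
        -- one step of the loop
        conv_lhs => rw [stringYieldLoop]
        have hle : (0 : Int) ≤ ((a :: (ms ++ [b])).length : Int) - 1 := by
          rw [hlenL]; push_cast; omega
        rw [dif_pos hle]
        rw [if_neg (show ¬ (((0 : Int) == ((a :: (ms ++ [b])).length : Int) - 1) = true) by
          rw [hlenL]; push_cast; simp; omega)]
        -- the two characters read in this step
        have hget0 : PySem.List.pyGet? (a :: (ms ++ [b])) 0 = some a := by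
          rw [PySem.List.pyGet?_of_nonneg _ (by omega)]; simp
        have hgetlast :
            PySem.List.pyGet? (a :: (ms ++ [b])) (((a :: (ms ++ [b])).length : Int) - 1) = some b := by
          rw [PySem.List.pyGet?_of_nonneg _ hle]
          have ht : (((a :: (ms ++ [b])).length : Int) - 1).toNat = (a :: ms).length := by
            rw [hlenL]; simp; omega
          rw [ht, show a :: (ms ++ [b]) = (a :: ms) ++ [b] by simp]
          exact List.getElem?_concat_length
        rw [hget0, hgetlast]
        -- the tail of the loop is the loop on ms
        have hrec :
            stringYieldLoop (a :: (ms ++ [b])) (0 + 1) (((a :: (ms ++ [b])).length : Int) - 1 - 1)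
              = stringYieldLoop ms 0 ((ms.length : Int) - 1) := by
          have e : ((a :: (ms ++ [b])).length : Int) - 1 - 1 = ((ms.length : Int) - 1) + 1 := by
            rw [hlenL]; push_cast; ring
          rw [e, show ((0 : Int) + 1) = (0 : Int) + 1 from rfl,
              loop_shift a (ms ++ [b]) 0 ((ms.length : Int) - 1) (by omega),
              loop_append ms [b] 0 ((ms.length : Int) - 1) (by omega) (by omega)]
        rw [hrec, ih ms.length (by omega) ms rfl]
        -- B's side peels off the same pair
        have hh : (ms.length + 2) / 2 = ms.length / 2 + 1 := by omega
        have hdiv : ms.length / 2 ≤ ms.length := Nat.div_le_self _ 2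
        have htake : (a :: (ms ++ [b])).take ((ms.length + 2) / 2)
            = a :: ms.take (ms.length / 2) := by
          rw [hh, List.take_succ_cons, List.take_append_of_le_length hdiv]
        have hrev : (a :: (ms ++ [b])).reverse.take ((ms.length + 2) / 2)
            = b :: ms.reverse.take (ms.length / 2) := by
          rw [hh, show (a :: (ms ++ [b])).reverse = b :: (ms.reverse ++ [a]) by simp,
              List.take_succ_cons, List.take_append_of_le_length (by simp [hdiv])]
        unfold altL
        rw [hlenL]
        rw [htake, hrev, List.zip_cons_cons, List.map_cons]
        rw [show (ms.length + 2) % 2 = ms.length % 2 by omega]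
        rcases Nat.even_or_odd ms.length with he | ho
        · have h0 : ms.length % 2 = 0 := Nat.even_iff.mp he
          rw [if_neg (by omega), if_neg (by omega)]
          simp
        · have hodd : ms.length % 2 = 1 := Nat.odd_iff.mp ho
          have hlt : ms.length / 2 < ms.length := by omega
          have hmid : (a :: (ms ++ [b])).getD ((ms.length + 2) / 2) ' '
              = ms.getD (ms.length / 2) ' ' := by
            rw [hh, List.getD_cons_succ, List.getD_eq_getElem?_getD, List.getD_eq_getElem?_getD,
                List.getElem?_append_left hlt]
          rw [if_pos hodd, if_pos hodd, hmid]
          simp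

theorem stringYield_eq_alt (str : String) : stringYield str = stringYield_alt str := by
  rw [alt_eq_altL]
  exact main_lemma str.toList.length str.toList rfl

-- ===== VERDICT (by name: the statement is the Claim_ definition above) =====
theorem stringYield_spec : Claim_equal_stringYield := by
  intro str _
  unfold Spec_stringYield
  exact stringYield_eq_alt str
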